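-- pv_equiv track=rewrite | github.com/bgrzesik/asd | antivirus_machines.py | placement
-- ===== SOURCE A (Python) =====
-- def placement(A, k):
--     i = 0
--     m = 0
--     while i + k < len(A):
--         l = i
--         for j in range(min(i + k, len(A) - 1), i, -1):
--             if A[j] == 1:
--                 i = j
--                 m += 1
--                 break
--         if i == l:
--             return None
--
--     return m
-- ===== SOURCE B (Python) =====
-- def placement(A, k):
--     n = len(A)
--     # last1[p] = largest index q <= p with A[q] == 1, or -1 if none
--     last1 = []
--     prev = -1
--     for idx, x in enumerate(A):
--         if x == 1:
--             prev = idx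
--         last1.append(prev)
--     i = 0
--     m = 0
--     while i + k < n:
--         hi = min(i + k, n - 1)
--         j = last1[hi] if hi >= 0 else -1
--         if j <= i:
--             return None
--         i = j
--         m += 1
--     return m
-- ===== Notes on version B (the rewrite author's own statement) =====
-- stated objective: alternative
-- what changed: B precomputes a last-one-index prefix table once and performs each greedy jump by a single table lookup instead of A's per-jump downward scan of the window.
import Mathlib
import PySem

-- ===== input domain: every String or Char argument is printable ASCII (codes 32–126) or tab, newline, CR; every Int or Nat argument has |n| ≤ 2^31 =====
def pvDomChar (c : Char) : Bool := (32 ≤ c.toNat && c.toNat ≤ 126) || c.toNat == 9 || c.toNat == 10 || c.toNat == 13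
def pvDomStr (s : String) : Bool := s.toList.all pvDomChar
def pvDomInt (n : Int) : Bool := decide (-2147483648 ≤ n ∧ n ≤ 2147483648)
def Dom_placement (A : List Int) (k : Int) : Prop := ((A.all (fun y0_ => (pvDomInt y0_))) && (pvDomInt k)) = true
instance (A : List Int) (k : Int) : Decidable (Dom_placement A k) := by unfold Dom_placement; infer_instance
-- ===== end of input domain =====

-- B replaces A's per-jump downward scan of the window by a single lookup in a
-- precomputed last-one-index prefix table (alternative algorithm, same result).

-- ===== PORT A =====
-- inner 'for j in range(min(i+k, len(A)-1), i, -1): if A[j] == 1: break' — first hit scanning down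
def pvScanDownA (A : List Int) : List Int → Option Int
  | [] => none
  | j :: rest => if PySem.List.pyGet? A j = some 1 then some j else pvScanDownA A rest

-- outer while-loop; fuel is only a totality guard (i strictly increases and stays < len A,
-- so fuel A.length + 1 is never exhausted)
def pvLoopA (A : List Int) (k : Int) : Nat → Int → Int → Option Int
  | 0, _, _ => none
  | fuel + 1, i, m =>
    if i + k < (A.length : Int) then
      match pvScanDownA A (PySem.List.pyRange (min (i + k) ((A.length : Int) - 1)) i (-1)) with
      | some j => pvLoopA A k fuel j (m + 1)
      | none => none          -- i == l: return None
    else some m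

def placement (A : List Int) (k : Int) : Option Int := pvLoopA A k (A.length + 1) 0 0

-- ===== PORT B =====
-- 'for idx, x in enumerate(A): prev = idx if x == 1 else prev; last1.append(prev)'
def pvLast1Aux : List (Int × Int) → Int → List Int
  | [], _ => []
  | (idx, x) :: rest, prev =>
    let p := if x = 1 then idx else prev
    p :: pvLast1Aux rest p

-- while-loop of B; same fuel guard; 'last1[hi]' is always in range when 0 ≤ hi (hi ≤ len-1),
-- so the .getD (-1) default is never used
def pvLoopB (A : List Int) (last1 : List Int) (k : Int) : Nat → Int → Int → Option Int
  | 0, _, _ => none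
  | fuel + 1, i, m =>
    if i + k < (A.length : Int) then
      let hi := min (i + k) ((A.length : Int) - 1)
      let j := if 0 ≤ hi then (PySem.List.pyGet? last1 hi).getD (-1) else -1
      if j ≤ i then none
      else pvLoopB A last1 k fuel j (m + 1)
    else some m

def placement_alt (A : List Int) (k : Int) : Option Int :=
  pvLoopB A (pvLast1Aux (PySem.List.enumerate A 0) (-1)) k (A.length + 1) 0 0

-- ===== PRECONDITION & SPEC =====
def Spec_placement (A : List Int) (k : Int) (out : Option Int) : Prop := out = placement_alt A k
instance (A : List Int) (k : Int) (out : Option Int) : Decidable (Spec_placement A k out) := by unfold Spec_placement; infer_instance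

-- ===== CLAIM (what is proved, stated in full; the proofs are below) =====
def Claim_equal_placement : Prop := ∀ (A : List Int) (k : Int), Dom_placement A k → Spec_placement A k (placement A k)

-- ===== LEMMAS AND PROOFS =====

-- closed-form value of the h-th entry of pvLast1Aux (enumerate A s) prev
def pvLastG (A : List Int) (s prev : Int) : Nat → Int
  | 0 => if A.getD 0 0 = 1 then s else prev
  | h + 1 => if A.getD (h + 1) 0 = 1 then s + (h + 1 : Nat) else pvLastG A s prev h

lemma pvLast1Aux_length (xs : List (Int × Int)) (prev : Int) :
    (pvLast1Aux xs prev).length = xs.length := by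
  induction xs generalizing prev with
  | nil => rfl
  | cons p rest ih => cases p; simp [pvLast1Aux, ih]

lemma pvLastG_shift (x : Int) (rest : List Int) (s prev : Int) (h : Nat) :
    pvLastG (x :: rest) s prev (h + 1) =
      pvLastG rest (s + 1) (if x = 1 then s else prev) h := by
  induction h with
  | zero => simp [pvLastG]
  | succ h ih =>
      have e : (x :: rest).getD (h + 1 + 1) 0 = rest.getD (h + 1) 0 := rfl
      rw [pvLastG, ih, pvLastG, e]
      split_ifs <;> first | rfl | (push_cast; ring)

lemma pvLast1Aux_getD (A : List Int) (s prev : Int) (h : Nat) (hh : h < A.length) :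
    (pvLast1Aux (PySem.List.enumerate A s) prev).getD h 0 = pvLastG A s prev h := by
  induction A generalizing s prev h with
  | nil => simp at hh
  | cons x rest ih =>
      rw [PySem.List.enumerate_cons]
      cases h with
      | zero => simp [pvLast1Aux, pvLastG]
      | succ h =>
          rw [pvLastG_shift]
          simp only [pvLast1Aux, List.getD_cons_succ]
          exact ih (s + 1) _ h (by simpa using hh)

lemma pvLastG_le (A : List Int) (s prev : Int) (h : Nat) (hp : prev ≤ s) :
    pvLastG A s prev h ≤ s + h := by
  induction h with
  | zero => simp [pvLastG]; split <;> omega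
  | succ h ih => simp [pvLastG]; split <;> [omega; (push_cast; omega)]

lemma pvScan_key (A : List Int) (h : Nat) (i : Int) (hi : 0 ≤ i) (hn : h < A.length) :
    pvScanDownA A (PySem.List.pyRange (h : Int) i (-1)) =
      (if pvLastG A 0 (-1) h ≤ i then none else some (pvLastG A 0 (-1) h)) := by
  induction h with
  | zero =>
      rw [PySem.List.pyRange_neg_one_eq_nil (by omega)]
      have : pvLastG A 0 (-1) 0 ≤ i := by simp [pvLastG]; split <;> omega
      simp [pvScanDownA, this]
  | succ h ih =>
      by_cases hc : ((h : Int) + 1) ≤ i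
      · rw [show ((h + 1 : Nat) : Int) = (h : Int) + 1 by push_cast; ring,
            PySem.List.pyRange_neg_one_eq_nil hc]
        have := pvLastG_le A 0 (-1) (h + 1) (by omega)
        have : pvLastG A 0 (-1) (h + 1) ≤ i := by push_cast at this ⊢; omega
        simp [pvScanDownA, this]
      · rw [show ((h + 1 : Nat) : Int) = (h : Int) + 1 by push_cast; ring,
            PySem.List.pyRange_neg_one_cons (by omega)]
        have hget : PySem.List.pyGet? A ((h : Int) + 1) = some (A.getD (h + 1) 0) := by
          rw [show ((h : Int) + 1) = ((h + 1 : Nat) : Int) by push_cast; ring,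
              PySem.List.pyGet?_natCast]
          rw [List.getElem?_eq_getElem hn, List.getD_eq_getElem _ _ hn]
        by_cases hv : A.getD (h + 1) 0 = 1
        · have hg : pvLastG A 0 (-1) (h + 1) = (h : Int) + 1 := by
            rw [pvLastG, if_pos hv]; push_cast; ring
          rw [hg, if_neg hc]
          simp only [pvScanDownA, hget]
          rw [if_pos (by rw [hv])]
        · have hg : pvLastG A 0 (-1) (h + 1) = pvLastG A 0 (-1) h := by
            rw [pvLastG, if_neg hv]
          simp only [pvScanDownA, hget]
          rw [if_neg (show ¬ (some (A.getD (h + 1) 0) = some 1) from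
                fun e => hv (Option.some_injective _ e)), hg,
              show (h : Int) + 1 - 1 = (h : Int) by ring]
          exact ih (by omega)

lemma pvLoop_eq (A : List Int) (k : Int) (fuel : Nat) :
    ∀ i m : Int, 0 ≤ i →
      pvLoopA A k fuel i m =
        pvLoopB A (pvLast1Aux (PySem.List.enumerate A 0) (-1)) k fuel i m := by
  induction fuel with
  | zero => intro i m _; rfl
  | succ fuel ih =>
      intro i m hi0
      set L := pvLast1Aux (PySem.List.enumerate A 0) (-1) with hL
      simp only [pvLoopA, pvLoopB]
      by_cases hc : i + k < (A.length : Int)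
      · rw [if_pos hc, if_pos hc]
        have hmin : min (i + k) ((A.length : Int) - 1) = i + k := by omega
        by_cases hneg : 0 ≤ i + k
        · -- hi = i + k, in range
          have hlt : (i + k).toNat < A.length := by omega
          have hLlen : L.length = A.length := by
            rw [hL, pvLast1Aux_length, PySem.List.length_enumerate]
          have hj : (PySem.List.pyGet? L (i + k)).getD (-1) = pvLastG A 0 (-1) (i + k).toNat := by
            rw [show (i + k) = (((i + k).toNat : Nat) : Int) by omega,
                PySem.List.pyGet?_natCast,
                List.getElem?_eq_getElem (by omega : (i + k).toNat < L.length)]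
            simp only [Option.getD_some]
            rw [← List.getD_eq_getElem L 0 (by omega : (i + k).toNat < L.length), hL]
            exact pvLast1Aux_getD A 0 (-1) _ hlt
          have hscan := pvScan_key A (i + k).toNat i hi0 hlt
          rw [show (((i + k).toNat : Nat) : Int) = i + k by omega] at hscan
          rw [hmin, hscan]
          simp only [if_pos hneg, hj]
          by_cases hle : pvLastG A 0 (-1) (i + k).toNat ≤ i
          · rw [if_pos hle, if_pos hle]
          · rw [if_neg hle, if_neg hle]
            exact ih _ _ (by omega)
        · -- hi < 0: empty range / j = -1
          rw [hmin, PySem.List.pyRange_neg_one_eq_nil (by omega)]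
          simp only [pvScanDownA, if_neg hneg]
          rw [if_pos (by omega : (-1 : Int) ≤ i)]
      · rw [if_neg hc, if_neg hc]

-- ===== VERDICT (by name: the statement is the Claim_ definition above) =====
theorem placement_spec : Claim_equal_placement := by
  intro A k _
  show placement A k = placement_alt A k
  exact pvLoop_eq A k (A.length + 1) 0 0 le_rfl
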